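-- pv_equiv track=rewrite | github.com/RUCAIBox/LLMSurvey | Experiments/MathematicalReasoning/solve_turbo.py | get_answer_boxed
-- ===== SOURCE A (Python) =====
-- def get_answer_boxed(content):
--         pattern = '\\boxed'
--         start_pos = content.rfind(pattern)
--         answer = ''
--         num_left = 0
--         for i in range(start_pos + 7, len(content)):
--             if (content[i] == '}' and num_left == 0):
--                 break
--             if (content[i] == '{'):
--                 num_left = num_left + 1
--             elif (content[i] == '}'):
--                 num_left = num_left - 1
--             answer = answer + content[i]
--         return answer
-- ===== SOURCE B (Python) =====
-- def get_answer_boxed(content):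
--     base = content.rfind('\\boxed') + 7
--     depth = 0
--     cur = base
--     while True:
--         o = content.find('{', cur)
--         c = content.find('}', cur)
--         if c == -1:
--             return content[base:]
--         if o != -1 and o < c:
--             depth += 1
--             cur = o + 1
--         elif depth == 0:
--             return content[base:c]
--         else:
--             depth -= 1
--             cur = c + 1
-- ===== Notes on version B (the rewrite author's own statement) =====
-- stated objective: faster
-- what changed: B jumps between brace positions with str.find(_, cursor) and returns a single slice of the input, instead of A's per-character Python loop that compares every character and grows the answer by repeated string concatenation.
import Mathlib
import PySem

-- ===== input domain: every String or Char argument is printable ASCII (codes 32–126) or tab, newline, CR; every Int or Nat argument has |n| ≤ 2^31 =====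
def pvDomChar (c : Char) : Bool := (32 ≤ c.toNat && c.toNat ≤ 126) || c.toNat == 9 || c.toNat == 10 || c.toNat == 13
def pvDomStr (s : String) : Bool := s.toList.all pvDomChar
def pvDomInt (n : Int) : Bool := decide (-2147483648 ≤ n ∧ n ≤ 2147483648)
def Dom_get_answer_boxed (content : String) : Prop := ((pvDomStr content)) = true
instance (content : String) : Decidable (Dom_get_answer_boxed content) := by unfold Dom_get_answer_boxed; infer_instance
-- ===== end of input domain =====

-- B replaces A's per-character loop (string-concatenation accumulator) by jumps between
-- brace positions via find(_, cursor) plus a single slice; objective: alternative algorithm.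


-- ===== PORT A =====
-- A's for-loop over i in range(start_pos+7, len(content)) reading content[i], with break:
-- ported as structural recursion over the list of characters from index start_pos+7,
-- carrying A's state (answer, num_left); `answer = answer + content[i]` is `answer ++ [ch]`.
def loopA : List Char → List Char → Int → List Char
  | [], answer, _ => answer
  | ch :: rest, answer, numLeft =>
    if ch = '}' ∧ numLeft = 0 then answer
    else loopA rest (answer ++ [ch])
      (if ch = '{' then numLeft + 1 else if ch = '}' then numLeft - 1 else numLeft)

def get_answer_boxed (content : String) : String :=
  let pattern := "\\boxed"
  let start_pos := PySem.Str.rfind content pattern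
  -- start_pos + 7 ≥ 6, so .toNat is exact; drop clamps like Python's empty range
  String.ofList (loopA (content.toList.drop (start_pos + 7).toNat) [] 0)

-- ===== PORT B =====
-- termination facts about Chars.findFrom, cited by loopB's decreasing_by
theorem pvFindFrom_neg_of_gt (l sub : List Char) (cur : Nat) (h : l.length < cur) :
    PySem.Chars.findFrom l sub (cur : Int) = -1 := by
  simp only [PySem.Chars.findFrom]
  have h1 : ¬ ((cur : Int) < 0) := by omega
  simp only [if_neg h1]
  rw [if_pos (by exact_mod_cast h)]

theorem pvFindFrom_bounds (l sub : List Char) (cur : Nat) (hsub : sub ≠ [])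
    (h : PySem.Chars.findFrom l sub (cur : Int) ≠ -1) :
    cur ≤ (PySem.Chars.findFrom l sub (cur : Int)).toNat ∧
      (PySem.Chars.findFrom l sub (cur : Int)).toNat < l.length := by
  have hcur : cur ≤ l.length := by
    by_contra hc
    exact h (pvFindFrom_neg_of_gt l sub cur (by omega))
  obtain ⟨h1, h2, _⟩ := PySem.Chars.findFrom_natCast_spec l sub cur hcur h
  have hlen := h2.length_le
  have hs : 1 ≤ sub.length := by cases sub <;> simp_all
  rw [List.length_drop] at hlen
  omega

-- Python B's while-loop: cur, depth; o/c are content.find('{'/'}', cur) (= Chars.findFrom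
-- on the character list); the slices content[base:] and content[base:c] are drop/take
-- (exact here since 0 ≤ base and 0 ≤ c).
def loopB (l : List Char) (base cur : Nat) (depth : Int) : List Char :=
  if hc : PySem.Chars.findFrom l ['}'] (cur : Int) = -1 then l.drop base
  else if ho : PySem.Chars.findFrom l ['{'] (cur : Int) ≠ -1 ∧
      PySem.Chars.findFrom l ['{'] (cur : Int) < PySem.Chars.findFrom l ['}'] (cur : Int) then
    loopB l base ((PySem.Chars.findFrom l ['{'] (cur : Int)).toNat + 1) (depth + 1)
  else if depth = 0 then (l.drop base).take ((PySem.Chars.findFrom l ['}'] (cur : Int)).toNat - base)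
  else loopB l base ((PySem.Chars.findFrom l ['}'] (cur : Int)).toNat + 1) (depth - 1)
termination_by l.length + 1 - cur
decreasing_by
  · have := pvFindFrom_bounds l ['{'] cur (by simp) ho.1
    omega
  · have := pvFindFrom_bounds l ['}'] cur (by simp) hc
    omega

def get_answer_boxed_alt (content : String) : String :=
  let base := (PySem.Str.rfind content "\\boxed" + 7).toNat
  String.ofList (loopB content.toList base base 0)

-- ===== PRECONDITION & SPEC =====
def Spec_get_answer_boxed (content : String) (out : String) : Prop := out = get_answer_boxed_alt content
instance (content : String) (out : String) : Decidable (Spec_get_answer_boxed content out) := by unfold Spec_get_answer_boxed; infer_instance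

-- ===== CLAIM (what is proved, stated in full; the proofs are below) =====
def Claim_equal_get_answer_boxed : Prop := ∀ (content : String), Dom_get_answer_boxed content → Spec_get_answer_boxed content (get_answer_boxed content)

-- ===== LEMMAS AND PROOFS =====

-- canonical per-character scan; both ports are reduced to it
def scanA : List Char → Int → List Char
  | [], _ => []
  | ch :: rest, n =>
    if ch = '}' ∧ n = 0 then []
    else ch :: scanA rest (if ch = '{' then n + 1 else if ch = '}' then n - 1 else n)

theorem loopA_eq_scanA : ∀ (l ans : List Char) (n : Int), loopA l ans n = ans ++ scanA l n := by
  intro l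
  induction l with
  | nil => intro ans n; simp [loopA, scanA]
  | cons ch rest ih =>
    intro ans n
    simp only [loopA, scanA]
    split
    · simp
    · rw [ih]; simp

theorem scanA_no_close (l : List Char) (h : '}' ∉ l) : ∀ n, scanA l n = l := by
  induction l with
  | nil => intro n; simp [scanA]
  | cons ch rest ih =>
    intro n
    simp only [List.mem_cons, not_or] at h
    have hch : ¬(ch = '}' ∧ n = 0) := fun hh => h.1 hh.1.symm
    simp only [scanA, if_neg hch]
    rw [ih h.2]

theorem scanA_clean_prefix (w : List Char) (hw : ∀ x ∈ w, x ≠ '{' ∧ x ≠ '}') :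
    ∀ (rest : List Char) (n : Int), scanA (w ++ rest) n = w ++ scanA rest n := by
  induction w with
  | nil => simp
  | cons x w ih =>
    intro rest n
    have hx := hw x (by simp)
    have h1 : ¬(x = '}' ∧ n = 0) := fun hh => hx.2 hh.1
    simp only [List.cons_append, scanA, if_neg h1, if_neg hx.1, if_neg hx.2]
    rw [ih (fun y hy => hw y (by simp [hy]))]

theorem singleton_prefix_iff (a : Char) (l : List Char) : [a] <+: l ↔ l[0]? = some a := by
  constructor
  · rintro ⟨t, rfl⟩; simp
  · intro h
    cases l with
    | nil => simp at h
    | cons x t => simp at h; exact ⟨t, by simp [h]⟩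

theorem singleton_infix_iff (a : Char) (l : List Char) : [a] <:+: l ↔ a ∈ l := by
  constructor
  · intro h; exact h.mem (by simp)
  · intro h
    obtain ⟨s, t, rfl⟩ := List.append_of_mem h
    exact ⟨s, t, by simp⟩

theorem prefix_at (a : Char) (l : List Char) (i : Nat) : [a] <+: l.drop i ↔ l[i]? = some a := by
  rw [singleton_prefix_iff, List.getElem?_drop]
  simp

theorem drop_eq_take_append (l : List Char) (base cur : Nat) (hb : base ≤ cur) :
    l.drop base = (l.drop base).take (cur - base) ++ l.drop cur := by
  conv_lhs => rw [← List.take_append_drop (cur - base) (l.drop base)]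
  rw [List.drop_drop, Nat.add_sub_cancel' hb]

theorem take_split (l : List Char) (base cur m : Nat) (hb : base ≤ cur) (hc : cur ≤ m) :
    (l.drop base).take (m - base) = (l.drop base).take (cur - base) ++ (l.drop cur).take (m - cur) := by
  rw [show m - base = (cur - base) + (m - cur) by omega, List.take_add, List.drop_drop,
    Nat.add_sub_cancel' hb]

theorem take_succ_getElem (l : List Char) (cur m : Nat) (hm : m < l.length) (hc : cur ≤ m) :
    (l.drop cur).take (m + 1 - cur) = (l.drop cur).take (m - cur) ++ [l[m]] := by
  rw [show m + 1 - cur = (m - cur) + 1 by omega, List.take_add_one, List.getElem?_drop,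
    show cur + (m - cur) = m by omega, List.getElem?_eq_getElem hm]
  rfl

theorem mem_window (l : List Char) (cur m : Nat) (x : Char) (hx : x ∈ (l.drop cur).take (m - cur)) :
    ∃ i, cur ≤ i ∧ i < m ∧ l[i]? = some x := by
  obtain ⟨i, hi, hget⟩ := List.mem_iff_getElem.mp hx
  have hi' := hi
  rw [List.length_take, List.length_drop] at hi'
  rw [List.getElem_take, List.getElem_drop] at hget
  exact ⟨cur + i, by omega, by omega, by rw [List.getElem?_eq_getElem (by omega)]; exact congrArg some hget⟩

theorem mem_drop_of_getElem? (l : List Char) (cur i : Nat) (x : Char) (h1 : cur ≤ i)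
    (h2 : l[i]? = some x) : x ∈ l.drop cur := by
  have h3 : (l.drop cur)[i - cur]? = some x := by
    rw [List.getElem?_drop, show cur + (i - cur) = i by omega]; exact h2
  obtain ⟨hlt, heq⟩ := List.getElem?_eq_some_iff.mp h3
  exact heq ▸ List.getElem_mem hlt

-- the edge case cur > len: both find calls miss, B returns content[base:]
theorem loopB_big (l : List Char) (base cur : Nat) (d : Int) (hgt : l.length < cur)
    (hb : base ≤ cur) :
    loopB l base cur d = (l.drop base).take (cur - base) ++ scanA (l.drop cur) d := by
  rw [loopB, dif_pos (pvFindFrom_neg_of_gt l ['}'] cur hgt),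
    List.drop_eq_nil_of_le (by omega : l.length ≤ cur)]
  simp only [scanA, List.append_nil]
  rw [List.take_of_length_le (by rw [List.length_drop]; omega)]

-- the invariant: loopB from cursor `cur` returns the already-accepted slice [base, cur)
-- followed by the per-character scan of the rest
theorem loopB_eq_scanA : ∀ (N : Nat) (l : List Char) (base cur : Nat) (d : Int),
    l.length + 1 - cur ≤ N → base ≤ cur →
    loopB l base cur d = (l.drop base).take (cur - base) ++ scanA (l.drop cur) d := by
  intro N
  induction N with
  | zero => intro l base cur d hN hb; exact loopB_big l base cur d (by omega) hb
  | succ N ih =>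
    intro l base cur d hN hb
    by_cases hcur : cur ≤ l.length
    · rw [loopB]
      set c := PySem.Chars.findFrom l ['}'] (cur : Int) with hcdef
      set o := PySem.Chars.findFrom l ['{'] (cur : Int) with hodef
      by_cases hc : c = -1
      · rw [dif_pos hc]
        have hmem : '}' ∉ l.drop cur := by
          have h := (PySem.Chars.findFrom_natCast_eq_neg_one_iff l ['}'] cur hcur).mp hc
          rw [singleton_infix_iff] at h
          exact h
        rw [scanA_no_close _ hmem]
        exact drop_eq_take_append l base cur hb
      · rw [dif_neg hc]
        obtain ⟨hc1, hc2⟩ := pvFindFrom_bounds l ['}'] cur (by simp) hc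
        obtain ⟨hcle, hcpre, hcmin⟩ := PySem.Chars.findFrom_natCast_spec l ['}'] cur hcur hc
        have hcget : l[c.toNat]? = some '}' := (prefix_at _ _ _).mp hcpre
        have hno_close : ∀ i, cur ≤ i → i < c.toNat → l[i]? ≠ some '}' := fun i h1 h2 hh =>
          hcmin i h1 h2 ((prefix_at _ _ _).mpr hh)
        by_cases ho : o ≠ -1 ∧ o < c
        · rw [dif_pos ho]
          obtain ⟨ho1, ho2⟩ := pvFindFrom_bounds l ['{'] cur (by simp) ho.1
          obtain ⟨hole, hopre, homin⟩ := PySem.Chars.findFrom_natCast_spec l ['{'] cur hcur ho.1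
          have hoget : l[o.toNat]? = some '{' := (prefix_at _ _ _).mp hopre
          have hno_open : ∀ i, cur ≤ i → i < o.toNat → l[i]? ≠ some '{' := fun i h1 h2 hh =>
            homin i h1 h2 ((prefix_at _ _ _).mpr hh)
          have hmk : o.toNat < c.toNat := by
            have := ho.2
            omega
          have hw : ∀ x ∈ (l.drop cur).take (o.toNat - cur), x ≠ '{' ∧ x ≠ '}' := by
            intro x hx
            obtain ⟨i, hi1, hi2, hget⟩ := mem_window l cur o.toNat x hx
            exact ⟨fun he => hno_open i hi1 hi2 (he ▸ hget),
                   fun he => hno_close i hi1 (by omega) (he ▸ hget)⟩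
          have hoelem : l[o.toNat] = '{' := by
            rw [List.getElem?_eq_getElem ho2] at hoget
            exact Option.some.inj hoget
          have hdec : l.drop cur = (l.drop cur).take (o.toNat - cur) ++ '{' :: l.drop (o.toNat + 1) := by
            conv_lhs => rw [drop_eq_take_append l cur o.toNat (by omega)]
            rw [List.drop_eq_getElem_cons ho2, hoelem]
          rw [hdec, scanA_clean_prefix _ hw]
          have hstep : scanA ('{' :: l.drop (o.toNat + 1)) d = '{' :: scanA (l.drop (o.toNat + 1)) (d + 1) := by
            simp [scanA]
          rw [hstep, ih l base (o.toNat + 1) (d + 1) (by omega) (by omega),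
            take_split l base cur (o.toNat + 1) hb (by omega),
            take_succ_getElem l cur o.toNat ho2 (by omega), hoelem]
          simp
        · rw [dif_neg ho]
          have hno_open : ∀ i, cur ≤ i → i < c.toNat → l[i]? ≠ some '{' := by
            intro i h1 h2 hh
            by_cases ho1 : o = -1
            · have h := (PySem.Chars.findFrom_natCast_eq_neg_one_iff l ['{'] cur hcur).mp ho1
              rw [singleton_infix_iff] at h
              exact h (mem_drop_of_getElem? l cur i '{' h1 hh)
            · obtain ⟨ho2', ho3'⟩ := pvFindFrom_bounds l ['{'] cur (by simp) ho1
              obtain ⟨hole, hopre, homin⟩ := PySem.Chars.findFrom_natCast_spec l ['{'] cur hcur ho1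
              have hoget : l[o.toNat]? = some '{' := (prefix_at _ _ _).mp hopre
              have hco : c ≤ o := by
                rcases not_and_or.mp ho with h' | h'
                · exact (h' ho1).elim
                · omega
              have hne : c.toNat ≠ o.toNat := by
                intro he
                rw [← he, hcget] at hoget
                simp at hoget
              have : c.toNat < o.toNat := by omega
              exact homin i h1 (by omega) ((prefix_at _ _ _).mpr hh)
          have hw : ∀ x ∈ (l.drop cur).take (c.toNat - cur), x ≠ '{' ∧ x ≠ '}' := by
            intro x hx
            obtain ⟨i, hi1, hi2, hget⟩ := mem_window l cur c.toNat x hx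
            exact ⟨fun he => hno_open i hi1 hi2 (he ▸ hget),
                   fun he => hno_close i hi1 hi2 (he ▸ hget)⟩
          have hcelem : l[c.toNat] = '}' := by
            rw [List.getElem?_eq_getElem hc2] at hcget
            exact Option.some.inj hcget
          have hdec : l.drop cur = (l.drop cur).take (c.toNat - cur) ++ '}' :: l.drop (c.toNat + 1) := by
            conv_lhs => rw [drop_eq_take_append l cur c.toNat (by omega)]
            rw [List.drop_eq_getElem_cons hc2, hcelem]
          rw [hdec, scanA_clean_prefix _ hw]
          by_cases hd : d = 0
          · rw [if_pos hd]
            have hstep : scanA ('}' :: l.drop (c.toNat + 1)) d = [] := by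
              subst hd; simp [scanA]
            rw [hstep, take_split l base cur c.toNat hb (by omega)]
            simp
          · rw [if_neg hd]
            have hstep : scanA ('}' :: l.drop (c.toNat + 1)) d = '}' :: scanA (l.drop (c.toNat + 1)) (d - 1) := by
              simp [scanA, hd]
            rw [hstep, ih l base (c.toNat + 1) (d - 1) (by omega) (by omega),
              take_split l base cur (c.toNat + 1) hb (by omega),
              take_succ_getElem l cur c.toNat hc2 (by omega), hcelem]
            simp
    · exact loopB_big l base cur d (by omega) hb

-- ===== VERDICT (by name: the statement is the Claim_ definition above) =====
theorem get_answer_boxed_spec : Claim_equal_get_answer_boxed := by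
  intro content _
  show get_answer_boxed content = get_answer_boxed_alt content
  simp only [get_answer_boxed, get_answer_boxed_alt]
  rw [loopA_eq_scanA, loopB_eq_scanA (content.toList.length + 1) _ _ _ _ (by omega) (le_refl _)]
  simp
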